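-- pv_equiv track=rewrite | github.com/dioptra-io/georesolver | geogiant/ecs_vp_selection/hostname_selection.py | select_hostname_max_bgp_prefix_per_cdn
-- ===== SOURCE A (Python) =====
-- from collections import defaultdict, OrderedDict
--
-- def select_hostname_max_bgp_prefix_per_cdn(
--     hostname_per_cdn: dict, bgp_prefixes_per_hostname: dict
-- ) -> dict:
--     hostname_per_cdn_max_bgp_prefix = defaultdict(dict)
--     for org, bgp_prefix_per_hostname in hostname_per_cdn.items():
--
--         bgp_prefix_per_hostname = sorted(
--             bgp_prefix_per_hostname.items(), key=lambda x: x[1]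
--         )
--         for hostname, bgp_prefixes_in_org in bgp_prefix_per_hostname:
--
--             # some hostnames has more than just one org
--             hostname_bgp_prefixes = bgp_prefixes_per_hostname[hostname]
--
--             if len(hostname_bgp_prefixes) > 10:
--                 hostname_per_cdn_max_bgp_prefix[org][hostname] = len(
--                     hostname_bgp_prefixes
--                 )
--
--     for org in hostname_per_cdn_max_bgp_prefix:
--         hostname_per_cdn_max_bgp_prefix[org] = sorted(
--             hostname_per_cdn_max_bgp_prefix[org].items(),
--             key=lambda x: x[1],
--             reverse=True,
--         )
--
--         hostname_per_cdn_max_bgp_prefix[org] = [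
--             hostname for hostname, _ in hostname_per_cdn_max_bgp_prefix[org]
--         ]
--
--     return hostname_per_cdn_max_bgp_prefix
-- ===== SOURCE B (Python) =====
-- from collections import defaultdict
--
-- def select_hostname_max_bgp_prefix_per_cdn(
--     hostname_per_cdn: dict, bgp_prefixes_per_hostname: dict
-- ) -> dict:
--     result = defaultdict(dict)
--     for org, bgp_prefix_per_hostname in hostname_per_cdn.items():
--         # group qualifying hostnames into buckets keyed by their BGP-prefix count
--         buckets = {}
--         for hostname, in_org in bgp_prefix_per_hostname.items():
--             n = len(bgp_prefixes_per_hostname[hostname])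
--             if n > 10:
--                 buckets.setdefault(n, []).append((in_org, hostname))
--         if buckets:
--             result[org] = [
--                 hostname
--                 for n in sorted(buckets, reverse=True)
--                 for _, hostname in sorted(buckets[n], key=lambda p: p[0])
--             ]
--     return result
-- ===== Notes on version B (the rewrite author's own statement) =====
-- stated objective: alternative
-- what changed: B replaces A's two global stable sorts per org by hash grouping: it buckets qualifying hostnames in a dict keyed by prefix count, sorts only the distinct counts (descending) and each small bucket by the in-org value, then concatenates the buckets.
import Mathlib
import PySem

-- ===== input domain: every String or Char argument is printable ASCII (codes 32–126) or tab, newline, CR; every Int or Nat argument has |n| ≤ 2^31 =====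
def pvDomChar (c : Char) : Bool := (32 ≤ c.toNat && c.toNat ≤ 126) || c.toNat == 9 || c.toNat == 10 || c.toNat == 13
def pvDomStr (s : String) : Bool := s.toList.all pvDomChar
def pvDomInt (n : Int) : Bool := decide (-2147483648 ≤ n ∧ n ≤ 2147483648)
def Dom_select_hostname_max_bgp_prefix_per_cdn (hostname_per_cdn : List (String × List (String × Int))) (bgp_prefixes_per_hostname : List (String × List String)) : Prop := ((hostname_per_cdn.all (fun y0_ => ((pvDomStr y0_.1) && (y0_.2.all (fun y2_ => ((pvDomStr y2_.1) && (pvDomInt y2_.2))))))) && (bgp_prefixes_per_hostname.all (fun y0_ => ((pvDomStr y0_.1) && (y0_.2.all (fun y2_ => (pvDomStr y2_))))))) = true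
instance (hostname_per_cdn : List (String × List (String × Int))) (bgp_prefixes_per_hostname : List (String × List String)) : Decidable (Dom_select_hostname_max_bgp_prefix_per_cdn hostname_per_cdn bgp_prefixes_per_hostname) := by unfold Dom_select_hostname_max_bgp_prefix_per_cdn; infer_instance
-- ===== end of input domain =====

-- B replaces A's two global stable sorts per org by grouping qualifying hostnames into count-keyed buckets, sorting only the distinct counts and each bucket (objective: alternative).


-- ===== PORT A =====
def select_hostname_max_bgp_prefix_per_cdn (hostname_per_cdn : List (String × List (String × Int))) (bgp_prefixes_per_hostname : List (String × List String)) : List (String × List String) :=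
  let bgpD := PySem.Dict.mk bgp_prefixes_per_hostname
  -- first loop: build the defaultdict(dict) of qualifying hostnames with their prefix counts
  let acc : PySem.Dict String (PySem.Dict String Int) :=
    hostname_per_cdn.foldl (fun acc op =>
      let bgp_prefix_per_hostname := PySem.List.sorted op.2 (fun x => x.2) false
      bgp_prefix_per_hostname.foldl (fun acc hp =>
        let hostname_bgp_prefixes := bgpD.getD hp.1 []
        if 10 < hostname_bgp_prefixes.length then
          acc.insert op.1 ((acc.getD op.1 PySem.Dict.empty).insert hp.1 (hostname_bgp_prefixes.length : Int))
        else acc) acc) PySem.Dict.empty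
  -- second loop: per org, sort the items by count descending and keep the hostnames
  acc.items.map (fun od =>
    (od.1, (PySem.List.sorted od.2.items (fun x => x.2) true).map (fun x => x.1)))

-- ===== PORT B =====
def select_hostname_max_bgp_prefix_per_cdn_alt (hostname_per_cdn : List (String × List (String × Int))) (bgp_prefixes_per_hostname : List (String × List String)) : List (String × List String) :=
  let bgpD := PySem.Dict.mk bgp_prefixes_per_hostname
  (hostname_per_cdn.foldl (fun res op =>
      -- group qualifying hostnames into buckets keyed by their BGP-prefix count
      let buckets : PySem.Dict Int (List (Int × String)) :=
        op.2.foldl (fun b hp =>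
          let n := (bgpD.getD hp.1 []).length
          if 10 < n then b.modify (n : Int) [] (fun L => L ++ [(hp.2, hp.1)]) else b)
          PySem.Dict.empty
      if buckets.items.isEmpty then res
      else res.insert op.1
        ((PySem.List.sorted buckets.keys (fun n => n) true).flatMap (fun n =>
          (PySem.List.sorted (buckets.getD n []) (fun p => p.1) false).map (fun p => p.2))))
    PySem.Dict.empty).items

-- ===== PRECONDITION & SPEC =====
-- Pre_ requires (i) pairwise-distinct keys at every dict level — the association lists encode Python dicts, and an
-- assoc list with duplicate keys does not arise from any dict argument — and (ii) every hostname mentioned under an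
-- org to be a key of bgp_prefixes_per_hostname, since Python A raises KeyError otherwise.
def Pre_select_hostname_max_bgp_prefix_per_cdn (hostname_per_cdn : List (String × List (String × Int))) (bgp_prefixes_per_hostname : List (String × List String)) : Prop :=
  (hostname_per_cdn.map (fun p => p.1)).Nodup ∧
  (bgp_prefixes_per_hostname.map (fun p => p.1)).Nodup ∧
  ∀ p ∈ hostname_per_cdn, (p.2.map (fun q => q.1)).Nodup ∧
    ∀ q ∈ p.2, q.1 ∈ bgp_prefixes_per_hostname.map (fun r => r.1)
instance (hostname_per_cdn : List (String × List (String × Int))) (bgp_prefixes_per_hostname : List (String × List String)) : Decidable (Pre_select_hostname_max_bgp_prefix_per_cdn hostname_per_cdn bgp_prefixes_per_hostname) := by unfold Pre_select_hostname_max_bgp_prefix_per_cdn; infer_instance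

def pvWitness_select_hostname_max_bgp_prefix_per_cdn : (List (String × List (String × Int))) × (List (String × List String)) :=
  ([("org", [("h", 1), ("g", 0)])],
   [("h", ["a","b","c","d","e","f","g","h","i","j","k"]), ("g", ["x"])])

def Spec_select_hostname_max_bgp_prefix_per_cdn (hostname_per_cdn : List (String × List (String × Int))) (bgp_prefixes_per_hostname : List (String × List String)) (out : List (String × List String)) : Prop := out = select_hostname_max_bgp_prefix_per_cdn_alt hostname_per_cdn bgp_prefixes_per_hostname
instance (hostname_per_cdn : List (String × List (String × Int))) (bgp_prefixes_per_hostname : List (String × List String)) (out : List (String × List String)) : Decidable (Spec_select_hostname_max_bgp_prefix_per_cdn hostname_per_cdn bgp_prefixes_per_hostname out) := by unfold Spec_select_hostname_max_bgp_prefix_per_cdn; infer_instance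

-- ===== CLAIM (what is proved, stated in full; the proofs are below) =====
def Claim_equal_select_hostname_max_bgp_prefix_per_cdn : Prop := ∀ (hostname_per_cdn : List (String × List (String × Int))) (bgp_prefixes_per_hostname : List (String × List String)), Dom_select_hostname_max_bgp_prefix_per_cdn hostname_per_cdn bgp_prefixes_per_hostname → Pre_select_hostname_max_bgp_prefix_per_cdn hostname_per_cdn bgp_prefixes_per_hostname → Spec_select_hostname_max_bgp_prefix_per_cdn hostname_per_cdn bgp_prefixes_per_hostname (select_hostname_max_bgp_prefix_per_cdn hostname_per_cdn bgp_prefixes_per_hostname)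

-- ===== LEMMAS AND PROOFS =====

-- ---- generic facts about PySem.List.insertBy (stable insertion) ----

theorem pv_insertBy_cons {α : Type} (b : α → α → Bool) (x y : α) (L : List α) :
    PySem.List.insertBy b x (y :: L)
      = if b x y then x :: y :: L else y :: PySem.List.insertBy b x L := by
  cases h : b x y <;> simp [PySem.List.insertBy, h]

theorem pv_insertBy_all {α : Type} (b : α → α → Bool) (x : α) (M : List α)
    (h : ∀ z ∈ M, b x z = true) : PySem.List.insertBy b x M = x :: M := by
  cases M with
  | nil => rfl
  | cons y L => simp [PySem.List.insertBy, h y (by simp)]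

theorem pv_insertBy_append_left {α : Type} (b : α → α → Bool) (x : α) :
    ∀ (A B : List α), (∀ y ∈ A, b x y = false) →
      PySem.List.insertBy b x (A ++ B) = A ++ PySem.List.insertBy b x B
  | [], B, _ => rfl
  | y :: A, B, h => by
      simp only [List.cons_append, PySem.List.insertBy, h y (by simp)]
      simp [pv_insertBy_append_left b x A B (fun z hz => h z (by simp [hz]))]

theorem pv_insertBy_map {α β : Type} (b : β → β → Bool) (m : α → β) (x : α) :
    ∀ L : List α, PySem.List.insertBy b (m x) (L.map m)
      = (PySem.List.insertBy (fun a c => b (m a) (m c)) x L).map m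
  | [] => rfl
  | y :: L => by
      cases h : b (m x) (m y) <;> simp [PySem.List.insertBy, h, pv_insertBy_map b m x L]

theorem pv_foldl_insertBy_map {α β : Type} (b : β → β → Bool) (m : α → β) :
    ∀ (l M : List α),
      (l.map m).foldl (fun acc y => PySem.List.insertBy b y acc) (M.map m)
        = (l.foldl (fun acc x => PySem.List.insertBy (fun a c => b (m a) (m c)) x acc) M).map m
  | [], M => rfl
  | x :: l, M => by
      simp only [List.map_cons, List.foldl_cons]
      rw [pv_insertBy_map b m x M]
      exact pv_foldl_insertBy_map b m l _

-- sorted of a mapped list is the mapped sorted on the composed key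
theorem pv_sorted_map {α β : Type} (l : List α) (m : α → β) (key : β → Int) (rev : Bool) :
    PySem.List.sorted (l.map m) key rev
      = (PySem.List.sorted l (fun a => key (m a)) rev).map m := by
  cases rev <;>
    simpa [PySem.List.sorted] using pv_foldl_insertBy_map _ m l []

-- snoc forms of sorted
theorem pv_sorted_snoc {α : Type} (l : List α) (x : α) (key : α → Int) :
    PySem.List.sorted (l ++ [x]) key false
      = PySem.List.insertBy (fun a b => decide (key a < key b)) x (PySem.List.sorted l key false) := by
  simp [PySem.List.sorted, List.foldl_append]

theorem pv_sorted_rev_snoc {α : Type} (l : List α) (x : α) (key : α → Int) :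
    PySem.List.sorted (l ++ [x]) key true
      = PySem.List.insertBy (fun a b => decide (key b < key a)) x (PySem.List.sorted l key true) := by
  simp [PySem.List.sorted, List.foldl_append]

-- ---- stable sort commutes with filter ----

theorem pv_insertBy_filter {α : Type} (key : α → Int) (keep : α → Bool) (x : α) :
    ∀ L : List α, L.Pairwise (fun a b => key a ≤ key b) →
      (PySem.List.insertBy (fun a b => decide (key a < key b)) x L).filter keep
        = if keep x then PySem.List.insertBy (fun a b => decide (key a < key b)) x (L.filter keep)
          else L.filter keep
  | [], _ => by cases h : keep x <;> simp [PySem.List.insertBy, h]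
  | y :: L, hP => by
      obtain ⟨hy, hL⟩ := List.pairwise_cons.mp hP
      have ih := pv_insertBy_filter key keep x L hL
      rw [pv_insertBy_cons]
      cases hq : decide (key x < key y) with
      | false =>
          cases hkx : keep x <;> cases hky : keep y <;>
            simp [hkx, hky, ih, pv_insertBy_cons, hq]
      | true =>
          have hxy : key x < key y := of_decide_eq_true hq
          have hall : ∀ z ∈ (y :: L).filter keep, decide (key x < key z) = true := by
            intro z hz
            rcases List.mem_cons.mp (List.mem_of_mem_filter hz) with rfl | hz''
            · exact hq
            · exact decide_eq_true (lt_of_lt_of_le hxy (hy z hz''))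
          cases hkx : keep x
          · simp [List.filter_cons, hkx]
          · rw [if_pos rfl, pv_insertBy_all _ x _ hall]
            simp [List.filter_cons, hkx]

theorem pv_filter_sorted {α : Type} (key : α → Int) (keep : α → Bool) (l : List α) :
    (PySem.List.sorted l key false).filter keep
      = PySem.List.sorted (l.filter keep) key false := by
  induction l using List.reverseRecOn with
  | nil => rfl
  | append_singleton l x ih =>
      rw [pv_sorted_snoc,
        pv_insertBy_filter key keep x _ (PySem.List.sorted_pairwise l key),
        List.filter_append]
      cases h : keep x <;>
        simp [h, ih, pv_sorted_snoc]

-- ---- the core: a reverse stable sort is the concatenation of its key groups, taken in descending key order ----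

theorem pv_flatMap_congr {α β : Type} (f g : α → List β) :
    ∀ l : List α, (∀ x ∈ l, f x = g x) → l.flatMap f = l.flatMap g
  | [], _ => rfl
  | x :: l, h => by
      rw [List.flatMap_cons, List.flatMap_cons, h x (by simp),
        pv_flatMap_congr f g l (fun y hy => h y (by simp [hy]))]

theorem pv_group {α : Type} (f : α → Int) :
    ∀ (L : List α) (D : List Int), D.Pairwise (fun a b => b < a) → (∀ x ∈ L, f x ∈ D) →
      PySem.List.sorted L f true = D.flatMap (fun n => L.filter (fun x => f x == n)) := by
  intro L
  induction L using List.reverseRecOn with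
  | nil => intro D _ _; simp [PySem.List.sorted]
  | append_singleton L x ih =>
      intro D hD hmem
      obtain ⟨D₁, D₂, rfl⟩ := List.append_of_mem (hmem x (by simp))
      have hD1 : ∀ n ∈ D₁, f x < n := by
        intro n hn
        exact (List.pairwise_append.mp hD).2.2 n hn (f x) (by simp)
      have hD2 : ∀ n ∈ D₂, n < f x := by
        have := (List.pairwise_append.mp hD).2.1
        exact (List.pairwise_cons.mp this).1
      have hnd1 : ∀ n ∈ D₁, ¬ (f x = n) := fun n hn he => absurd (he ▸ hD1 n hn) (lt_irrefl _)
      have hnd2 : ∀ n ∈ D₂, ¬ (f x = n) := fun n hn he => absurd (he ▸ hD2 n hn) (lt_irrefl _)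
      have ihL := ih (D₁ ++ f x :: D₂) hD (fun y hy => hmem y (by simp [hy]))
      rw [pv_sorted_rev_snoc, ihL]
      -- split the flatMap at the group of f x
      rw [List.flatMap_append, List.flatMap_cons]
      set filtL : Int → List α := fun n => L.filter (fun y => f y == n) with hfiltL
      have hmemf : ∀ (n : Int) (y : α), y ∈ filtL n → f y = n := by
        intro n y hy
        have := List.of_mem_filter hy
        exact eq_of_beq this
      -- insert x after the D₁ groups and the f x group, before the D₂ groups
      have hleft : ∀ y ∈ D₁.flatMap filtL ++ filtL (f x),
          (decide (f y < f x) : Bool) = false := by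
        intro y hy
        rcases List.mem_append.mp hy with hy1 | hy2
        · obtain ⟨n, hn, hyn⟩ := List.mem_flatMap.mp hy1
          have := hmemf n y hyn
          simp only [decide_eq_false_iff_not, not_lt, this]
          exact le_of_lt (hD1 n hn)
        · have := hmemf (f x) y hy2
          simp [this]
      have hright : ∀ z ∈ D₂.flatMap filtL, (decide (f z < f x) : Bool) = true := by
        intro z hz
        obtain ⟨n, hn, hzn⟩ := List.mem_flatMap.mp hz
        have := hmemf n z hzn
        simp only [decide_eq_true_eq, this]
        exact hD2 n hn
      rw [show D₁.flatMap filtL ++ (filtL (f x) ++ D₂.flatMap filtL)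
            = (D₁.flatMap filtL ++ filtL (f x)) ++ D₂.flatMap filtL by
          simp [List.append_assoc]]
      rw [pv_insertBy_append_left _ x _ _ hleft,
        pv_insertBy_all _ x _ hright]
      -- now compute the right-hand side for L ++ [x]
      have hgrp : ∀ (n : Int), (L ++ [x]).filter (fun y => f y == n)
          = filtL n ++ (if f x == n then [x] else []) := by
        intro n
        rw [List.filter_append]
        cases h : (f x == n : Bool) <;> simp [h, hfiltL]
      have h1 : D₁.flatMap (fun n => (L ++ [x]).filter (fun y => f y == n)) = D₁.flatMap filtL := by
        apply pv_flatMap_congr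
        intro n hn
        rw [hgrp n, if_neg (by simpa using hnd1 n hn)]
        simp
      have h2 : D₂.flatMap (fun n => (L ++ [x]).filter (fun y => f y == n)) = D₂.flatMap filtL := by
        apply pv_flatMap_congr
        intro n hn
        rw [hgrp n, if_neg (by simpa using hnd2 n hn)]
        simp
      rw [List.flatMap_append, List.flatMap_cons, h1, h2, hgrp (f x), if_pos (by simp)]
      simp [List.append_assoc]

-- ---- dict-building plumbing ----

-- the per-org prefix count and qualification test
def pvN (bgp : List (String × List String)) (h : String) : Nat :=
  ((PySem.Dict.mk bgp).getD h []).length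
def pvQ (bgp : List (String × List String)) (hp : String × Int) : Bool :=
  decide (10 < pvN bgp hp.1)
def pvFilt (bgp : List (String × List String)) (inner : List (String × Int)) : List (String × Int) :=
  (PySem.List.sorted inner (fun x => x.2) false).filter (pvQ bgp)
def pvDfold (bgp : List (String × List String)) (d : PySem.Dict String Int)
    (ps : List (String × Int)) : PySem.Dict String Int :=
  ps.foldl (fun d hp => d.insert hp.1 ((pvN bgp hp.1 : Int))) d
def pvAVal (bgp : List (String × List String)) (inner : List (String × Int)) : List String :=
  (PySem.List.sorted (pvDfold bgp PySem.Dict.empty (pvFilt bgp inner)).items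
    (fun x => x.2) true).map (fun x => x.1)

-- the qualifying triples (hostname, count, in-org value) of an org, in original order
def pvW (bgp : List (String × List String)) (inner : List (String × Int)) : List (String × Int × Int) :=
  inner.filterMap (fun hp =>
    if 10 < pvN bgp hp.1 then some (hp.1, ((pvN bgp hp.1 : Int), hp.2)) else none)

-- B's bucket dict and its per-org value
def pvBuckets (bgp : List (String × List String)) (inner : List (String × Int)) :
    PySem.Dict Int (List (Int × String)) :=
  inner.foldl (fun b hp =>
    if 10 < pvN bgp hp.1 then b.modify ((pvN bgp hp.1 : Int)) [] (fun L => L ++ [(hp.2, hp.1)])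
    else b) PySem.Dict.empty
def pvBVal (bgp : List (String × List String)) (inner : List (String × Int)) : List String :=
  (PySem.List.sorted (pvBuckets bgp inner).keys (fun n => n) true).flatMap (fun n =>
    (PySem.List.sorted ((pvBuckets bgp inner).getD n []) (fun p => p.1) false).map (fun p => p.2))

theorem pv_filterMap_if {α β : Type} (p : α → Bool) (m : α → β) :
    ∀ l : List α, l.filterMap (fun a => if p a = true then some (m a) else none)
      = (l.filter p).map m
  | [] => rfl
  | a :: l => by
      cases h : p a <;> simp [h, pv_filterMap_if p m l]

-- A's inner loop: conditional inserts into the outer accumulator under one org key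
theorem pv_inner_fold {bgp : List (String × List String)} (org : String) :
    ∀ (ps : List (String × Int)) (acc : PySem.Dict String (PySem.Dict String Int)), ps ≠ [] →
      ps.foldl (fun acc hp =>
          acc.insert org ((acc.getD org PySem.Dict.empty).insert hp.1 ((pvN bgp hp.1 : Int)))) acc
        = acc.insert org (pvDfold bgp (acc.getD org PySem.Dict.empty) ps)
  | [], _, h => absurd rfl h
  | hp :: ps, acc, _ => by
      by_cases hps : ps = []
      · subst hps; simp [pvDfold]
      · rw [List.foldl_cons, pv_inner_fold org ps _ hps]
        rw [PySem.Dict.getD_insert_self, PySem.Dict.insert_insert_self]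
        simp [pvDfold]

theorem pv_inner_fold_filter {bgp : List (String × List String)} (org : String)
    (s1 : List (String × Int)) (acc : PySem.Dict String (PySem.Dict String Int)) :
    s1.foldl (fun acc hp =>
        if 10 < pvN bgp hp.1 then
          acc.insert org ((acc.getD org PySem.Dict.empty).insert hp.1 ((pvN bgp hp.1 : Int)))
        else acc) acc
      = (s1.filter (pvQ bgp)).foldl (fun acc hp =>
          acc.insert org ((acc.getD org PySem.Dict.empty).insert hp.1 ((pvN bgp hp.1 : Int)))) acc := by
  rw [List.foldl_filter]
  congr 1
  funext acc hp
  by_cases h : 10 < pvN bgp hp.1 <;> simp [pvQ, h]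

-- A's outer loop, under distinct org keys each of which is fresh in acc
theorem pv_A_outer (bgp : List (String × List String)) :
    ∀ (l : List (String × List (String × Int))) (acc : PySem.Dict String (PySem.Dict String Int)),
      (l.map (fun p => p.1)).Nodup → (∀ op ∈ l, acc.contains op.1 = false) →
      (l.foldl (fun acc op =>
          (PySem.List.sorted op.2 (fun x => x.2) false).foldl (fun acc hp =>
            if 10 < pvN bgp hp.1 then
              acc.insert op.1 ((acc.getD op.1 PySem.Dict.empty).insert hp.1 ((pvN bgp hp.1 : Int)))
            else acc) acc) acc).items
        = acc.items ++ l.filterMap (fun op =>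
            if pvFilt bgp op.2 = [] then none
            else some (op.1, pvDfold bgp PySem.Dict.empty (pvFilt bgp op.2)))
  | [], acc, _, _ => by simp
  | op :: l, acc, hnd, hfresh => by
      have hnd' : (l.map (fun p => p.1)).Nodup := (List.nodup_cons.mp hnd).2
      have hop : op.1 ∉ l.map (fun p => p.1) := (List.nodup_cons.mp hnd).1
      rw [List.foldl_cons, pv_inner_fold_filter]
      rw [show (PySem.List.sorted op.2 (fun x => x.2) false).filter (pvQ bgp) = pvFilt bgp op.2 from rfl]
      by_cases hemp : pvFilt bgp op.2 = []
      · rw [hemp]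
        simp only [List.foldl_nil]
        rw [pv_A_outer bgp l acc hnd' (fun o ho => hfresh o (by simp [ho]))]
        simp [hemp]
      · rw [pv_inner_fold op.1 (pvFilt bgp op.2) acc hemp]
        have hc : acc.contains op.1 = false := hfresh op (by simp)
        have hget : acc.getD op.1 PySem.Dict.empty = PySem.Dict.empty :=
          PySem.Dict.getD_of_not_contains acc PySem.Dict.empty hc
        rw [hget]
        have hfresh' : ∀ o ∈ l,
            (acc.insert op.1 (pvDfold bgp PySem.Dict.empty (pvFilt bgp op.2))).contains o.1 = false := by
          intro o ho
          rw [PySem.Dict.contains_insert]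
          have h1 : (o.1 == op.1) = false := by
            simp only [beq_eq_false_iff_ne, ne_eq]
            intro heq
            exact hop (heq ▸ List.mem_map_of_mem ho)
          rw [h1, hfresh o (by simp [ho])]
          rfl
        rw [pv_A_outer bgp l _ hnd' hfresh']
        rw [PySem.Dict.items_insert_of_not_contains acc _ hc]
        simp [hemp]

-- B's outer loop, same shape
theorem pv_B_outer (bgp : List (String × List String)) :
    ∀ (l : List (String × List (String × Int))) (res : PySem.Dict String (List String)),
      (l.map (fun p => p.1)).Nodup → (∀ op ∈ l, res.contains op.1 = false) →
      (l.foldl (fun res op =>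
          if (pvBuckets bgp op.2).items.isEmpty then res
          else res.insert op.1 (pvBVal bgp op.2)) res).items
      = res.items ++ l.filterMap (fun op =>
          if (pvBuckets bgp op.2).items.isEmpty then none else some (op.1, pvBVal bgp op.2))
  | [], res, _, _ => by simp
  | op :: l, res, hnd, hfresh => by
      have hnd' : (l.map (fun p => p.1)).Nodup := (List.nodup_cons.mp hnd).2
      have hop : op.1 ∉ l.map (fun p => p.1) := (List.nodup_cons.mp hnd).1
      rw [List.foldl_cons]
      cases hemp : (pvBuckets bgp op.2).items.isEmpty with
      | true =>
          rw [if_pos rfl]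
          rw [pv_B_outer bgp l res hnd' (fun o ho => hfresh o (by simp [ho]))]
          simp [List.isEmpty_iff.mp hemp]
      | false =>
          rw [if_neg (by simp)]
          have hc : res.contains op.1 = false := hfresh op (by simp)
          have hfresh' : ∀ o ∈ l,
              ((res.insert op.1 (pvBVal bgp op.2))).contains o.1 = false := by
            intro o ho
            rw [PySem.Dict.contains_insert]
            have h1 : (o.1 == op.1) = false := by
              simp only [beq_eq_false_iff_ne, ne_eq]
              intro heq
              exact hop (heq ▸ List.mem_map_of_mem ho)
            rw [h1, hfresh o (by simp [ho])]
            rfl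
          rw [pv_B_outer bgp l _ hnd' hfresh']
          rw [PySem.Dict.items_insert_of_not_contains res _ hc]
          simp [List.isEmpty_eq_false_iff.mp hemp]

-- the bucket fold, rewritten over the qualifying triples
theorem pv_buckets_eq (bgp : List (String × List String)) :
    ∀ (inner : List (String × Int)) (d : PySem.Dict Int (List (Int × String))),
      inner.foldl (fun b hp =>
          if 10 < pvN bgp hp.1 then b.modify ((pvN bgp hp.1 : Int)) [] (fun L => L ++ [(hp.2, hp.1)])
          else b) d
        = ((pvW bgp inner).map (fun t => (t.2.1, (t.2.2, t.1)))).foldl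
            (fun d p => d.modify p.1 [] (fun L => L ++ [p.2])) d
  | [], _ => rfl
  | hp :: inner, d => by
      by_cases h : 10 < pvN bgp hp.1 <;>
        simp [pvW, h, pv_buckets_eq bgp inner]

theorem pv_buckets_getD (bgp : List (String × List String)) (inner : List (String × Int)) (n : Int) :
    (pvBuckets bgp inner).getD n []
      = ((pvW bgp inner).filter (fun t => t.2.1 == n)).map (fun t => (t.2.2, t.1)) := by
  rw [pvBuckets, pv_buckets_eq bgp inner, PySem.Dict.getD_foldl_modify_append,
    PySem.Dict.getD_empty, List.filter_map, List.map_map]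
  rfl

theorem pv_buckets_keys (bgp : List (String × List String)) (inner : List (String × Int)) :
    (pvBuckets bgp inner).keys = PySem.Set.ofList ((pvW bgp inner).map (fun t => t.2.1)) := by
  rw [pvBuckets, pv_buckets_eq bgp inner]
  have h := PySem.Dict.keys_foldl_modify_key
    ((pvW bgp inner).map (fun t => (t.2.1, t.2.2, t.1))) (fun p => p.1)
    ([] : List (Int × String)) (fun _ p L => L ++ [p.2]) PySem.Dict.empty
  rw [PySem.Dict.keys_empty, PySem.Set.update_nil_left, List.map_map] at h
  exact h

theorem pv_buckets_items_nil_iff (bgp : List (String × List String)) (inner : List (String × Int)) :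
    (pvBuckets bgp inner).items = [] ↔ pvW bgp inner = [] := by
  constructor
  · intro h
    cases hw : pvW bgp inner with
    | nil => rfl
    | cons t w =>
        exfalso
        have hk : t.2.1 ∈ (pvBuckets bgp inner).keys := by
          rw [pv_buckets_keys, PySem.Set.mem_ofList]
          exact List.mem_map_of_mem (by simp [hw])
        rw [show (pvBuckets bgp inner).keys = (pvBuckets bgp inner).items.map (fun p => p.1)
            from rfl, h] at hk
        simp at hk
  · intro h
    rw [pvBuckets, pv_buckets_eq bgp inner, h]
    rfl

-- the two per-org guards agree
theorem pv_guards (bgp : List (String × List String)) (inner : List (String × Int)) :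
    (pvFilt bgp inner = []) ↔ ((pvBuckets bgp inner).items.isEmpty = true) := by
  rw [List.isEmpty_iff, pv_buckets_items_nil_iff]
  have h1 : pvW bgp inner = ((inner.filter (pvQ bgp)).map
      (fun hp => (hp.1, ((pvN bgp hp.1 : Int), hp.2)))) := by
    rw [pvW, ← pv_filterMap_if (pvQ bgp) (fun hp => (hp.1, ((pvN bgp hp.1 : Int), hp.2))) inner]
    congr 1
    funext hp
    by_cases h : 10 < pvN bgp hp.1 <;> simp [pvQ, h]
  rw [h1, pvFilt, pv_filter_sorted]
  constructor
  · intro h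
    rw [PySem.List.sorted_eq_nil_iff] at h
    simp [h]
  · intro h
    rw [List.map_eq_nil_iff] at h
    rw [PySem.List.sorted_eq_nil_iff]
    exact h

-- the per-org values agree (distinct hostnames within the org)
theorem pv_org_eq (bgp : List (String × List String)) (inner : List (String × Int))
    (hnd : (inner.map (fun q => q.1)).Nodup) :
    pvAVal bgp inner = pvBVal bgp inner := by
  classical
  set l0 : List (String × Int) := inner.filter (pvQ bgp) with hl0
  set tri : (String × Int) → String × Int × Int :=
    (fun hp => (hp.1, ((pvN bgp hp.1 : Int), hp.2))) with htri
  set w : List (String × Int × Int) := l0.map tri with hw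
  have hfilt : pvFilt bgp inner = PySem.List.sorted l0 (fun x => x.2) false := by
    rw [pvFilt, pv_filter_sorted]
  have hnd0 : (l0.map (fun q => q.1)).Nodup :=
    hnd.sublist (List.Sublist.map (fun q : String × Int => q.1)
      (List.filter_sublist (p := pvQ bgp) (l := inner)))
  have hndsp : ((PySem.List.sorted l0 (fun x => x.2) false).map (fun q => q.1)).Perm
      (l0.map (fun q => q.1)) := (PySem.List.sorted_perm l0 _ false).map _
  have hnds : ((PySem.List.sorted l0 (fun x => x.2) false).map (fun q => q.1)).Nodup :=
    hndsp.nodup_iff.mpr hnd0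
  have hitems : (pvDfold bgp PySem.Dict.empty (pvFilt bgp inner)).items
      = (PySem.List.sorted l0 (fun x => x.2) false).map (fun hp => (hp.1, (pvN bgp hp.1 : Int))) := by
    rw [hfilt, pvDfold]
    rw [PySem.Dict.items_foldl_insert_fresh (PySem.List.sorted l0 (fun x => x.2) false)
      (fun hp => hp.1) (fun hp => ((pvN bgp hp.1 : Int))) PySem.Dict.empty
      (fun a _ => rfl) hnds]
    rfl
  have hsortw : PySem.List.sorted w (fun t => t.2.2) false
      = (PySem.List.sorted l0 (fun x => x.2) false).map tri := by
    rw [hw, pv_sorted_map]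
  have hmap1 : (PySem.List.sorted l0 (fun x => x.2) false).map (fun hp => (hp.1, (pvN bgp hp.1 : Int)))
      = (PySem.List.sorted w (fun t => t.2.2) false).map (fun t => (t.1, t.2.1)) := by
    rw [hsortw, List.map_map]
    rfl
  have hAVal : pvAVal bgp inner
      = (PySem.List.sorted (PySem.List.sorted w (fun t => t.2.2) false) (fun t => t.2.1) true).map
          (fun t => t.1) := by
    rw [pvAVal, hitems, hmap1, pv_sorted_map, List.map_map]
    rfl
  have hw' : w = pvW bgp inner := by
    rw [hw, hl0, pvW, ← pv_filterMap_if (pvQ bgp) tri inner]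
    congr 1
    funext hp
    by_cases h : 10 < pvN bgp hp.1 <;> simp [pvQ, htri, h]
  -- the descending list of distinct counts
  set S : List (String × Int × Int) := PySem.List.sorted w (fun t => t.2.2) false with hS
  set D : List Int := PySem.List.sorted (pvBuckets bgp inner).keys (fun n => n) true with hD
  have hkeys : (pvBuckets bgp inner).keys = PySem.Set.ofList (w.map (fun t => t.2.1)) := by
    rw [pv_buckets_keys, hw']
  have hDnd : D.Nodup := by
    refine ((PySem.List.sorted_perm _ _ _).nodup_iff).mpr ?_
    rw [hkeys]
    exact PySem.Set.nodup_ofList _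
  have hDle : D.Pairwise (fun a b => b ≤ a) := PySem.List.sorted_pairwise_rev _ _
  have hDlt : D.Pairwise (fun a b => b < a) := by
    have := hDle.and hDnd
    exact this.imp (fun h => lt_of_le_of_ne h.1 (Ne.symm h.2))
  have hcov : ∀ t ∈ S, t.2.1 ∈ D := by
    intro t ht
    have htw : t ∈ w := (PySem.List.mem_sorted _ _ _ _).mp ht
    rw [hD, PySem.List.mem_sorted, hkeys, PySem.Set.mem_ofList]
    exact List.mem_map_of_mem htw
  have hgrp := pv_group (fun t => t.2.1) S D hDlt hcov
  have hbucket : ∀ n : Int,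
      (PySem.List.sorted ((pvBuckets bgp inner).getD n []) (fun p => p.1) false).map (fun p => p.2)
        = (S.filter (fun t => t.2.1 == n)).map (fun t => t.1) := by
    intro n
    rw [pv_buckets_getD, ← hw', pv_sorted_map, List.map_map]
    have : S.filter (fun t => t.2.1 == n)
        = PySem.List.sorted (w.filter (fun t => t.2.1 == n)) (fun t => t.2.2) false := by
      rw [hS, pv_filter_sorted]
    rw [this]
    rfl
  rw [hAVal, hgrp, pvBVal, ← hD]
  rw [List.map_flatMap]
  apply pv_flatMap_congr
  intro n _
  rw [hbucket n]

theorem pv_filterMap_congr {α β : Type} (f g : α → Option β) :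
    ∀ l : List α, (∀ x ∈ l, f x = g x) → l.filterMap f = l.filterMap g
  | [], _ => rfl
  | x :: l, h => by
      rw [List.filterMap_cons, List.filterMap_cons, h x (by simp),
        pv_filterMap_congr f g l (fun y hy => h y (by simp [hy]))]

-- the assembled equivalence
theorem pv_main (hcdn : List (String × List (String × Int))) (bgp : List (String × List String))
    (hPre : Pre_select_hostname_max_bgp_prefix_per_cdn hcdn bgp) :
    select_hostname_max_bgp_prefix_per_cdn hcdn bgp
      = select_hostname_max_bgp_prefix_per_cdn_alt hcdn bgp := by
  obtain ⟨hnd, -, hinner⟩ := hPre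
  have hA : select_hostname_max_bgp_prefix_per_cdn hcdn bgp
      = ((hcdn.foldl (fun acc op =>
            (PySem.List.sorted op.2 (fun x => x.2) false).foldl (fun acc hp =>
              if 10 < pvN bgp hp.1 then
                acc.insert op.1 ((acc.getD op.1 PySem.Dict.empty).insert hp.1 ((pvN bgp hp.1 : Int)))
              else acc) acc) PySem.Dict.empty).items).map (fun od =>
          (od.1, (PySem.List.sorted od.2.items (fun x => x.2) true).map (fun x => x.1))) := rfl
  have hB : select_hostname_max_bgp_prefix_per_cdn_alt hcdn bgp
      = (hcdn.foldl (fun res op =>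
          if (pvBuckets bgp op.2).items.isEmpty then res
          else res.insert op.1 (pvBVal bgp op.2)) PySem.Dict.empty).items := rfl
  rw [hA, hB,
    pv_A_outer bgp hcdn PySem.Dict.empty hnd (fun op _ => rfl),
    pv_B_outer bgp hcdn PySem.Dict.empty hnd (fun op _ => rfl)]
  have h1 : (PySem.Dict.empty : PySem.Dict String (PySem.Dict String Int)).items = [] := rfl
  have h2 : (PySem.Dict.empty : PySem.Dict String (List String)).items = [] := rfl
  rw [h1, h2]
  simp only [List.nil_append, List.map_filterMap]
  apply pv_filterMap_congr
  intro op hop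
  by_cases hemp : pvFilt bgp op.2 = []
  · rw [if_pos hemp, if_pos ((pv_guards bgp op.2).mp hemp)]
    rfl
  · rw [if_neg hemp, if_neg (fun h => hemp ((pv_guards bgp op.2).mpr h))]
    simp only [Option.map_some]
    have horg := pv_org_eq bgp op.2 (hinner op hop).1
    rw [pvAVal] at horg
    rw [horg]

-- ===== VERDICT (by name: the statement is the Claim_ definition above) =====
theorem select_hostname_max_bgp_prefix_per_cdn_spec : Claim_equal_select_hostname_max_bgp_prefix_per_cdn := by
  intro hcdn bgp _hDom hPre
  exact pv_main hcdn bgp hPre
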